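-- pv_equiv track=rewrite | github.com/wasabi9812/week2_jinho | 백준/Bronze/8958. OX퀴즈/OX퀴즈.py | successive
-- ===== SOURCE A (Python) =====
-- def successive(string):
--     cnt = 0
--     sum = 0
--     result = 0
--     for char in string:
--         if char == "O":
--             cnt += 1
--             sum = cnt
--             result += sum
--         else:
--             cnt = 0
--             sum = 0
--     return result
-- ===== SOURCE B (Python) =====
-- def successive(string):
--     total = 0
--     i = 0
--     n = len(string)
--     while i < n:
--         if string[i] == "O":
--             j = i
--             while j < n and string[j] == "O":
--                 j += 1
--             L = j - i
--             total += L * (L + 1) // 2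
--             i = j
--         else:
--             i += 1
--     return total
-- ===== Notes on version B (the rewrite author's own statement) =====
-- stated objective: alternative
-- what changed: B scans maximal runs of 'O' with a two-pointer loop and adds the closed-form triangular number L*(L+1)//2 per run, instead of A's per-character streak counter and running sum.
import Mathlib
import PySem

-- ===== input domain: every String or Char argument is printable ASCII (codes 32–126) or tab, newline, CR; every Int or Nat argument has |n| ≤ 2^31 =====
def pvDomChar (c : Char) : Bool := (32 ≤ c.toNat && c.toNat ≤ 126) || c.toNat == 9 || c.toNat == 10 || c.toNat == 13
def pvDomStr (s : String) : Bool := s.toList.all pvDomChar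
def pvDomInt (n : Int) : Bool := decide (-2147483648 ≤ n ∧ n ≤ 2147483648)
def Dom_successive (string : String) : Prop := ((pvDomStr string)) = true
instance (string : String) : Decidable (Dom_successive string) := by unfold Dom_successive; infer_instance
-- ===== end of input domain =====

-- B scans maximal runs of 'O' and adds the closed-form triangular number per run,
-- instead of A's per-character streak counter; same values on every input.

-- ===== PORT A =====
-- literal port of A's loop: state (cnt, sum, result) over the characters
def successiveLoop (cnt sum result : Int) : List Char → Int
  | [] => result
  | c :: t =>
    if c = 'O' then successiveLoop (cnt + 1) (cnt + 1) (result + (cnt + 1)) t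
    else successiveLoop 0 0 result t

def successive (string : String) : Int :=
  successiveLoop 0 0 0 string.toList

-- ===== PORT B =====
-- span of leading 'O' characters: (run length, rest); port of Source B's inner while loop
def spanO : List Char → Nat × List Char
  | [] => (0, [])
  | c :: t => if c = 'O' then ((spanO t).1 + 1, (spanO t).2) else (0, c :: t)

-- L*(L+1)//2 on a nonnegative L: Nat division is exact Python // here
def triangle (L : Nat) : Nat := L * (L + 1) / 2

theorem spanO_len (t : List Char) : (spanO t).2.length ≤ t.length := by
  induction t with
  | nil => simp [spanO]
  | cons c t ih =>
    by_cases h : c = 'O' <;> simp [spanO, h] <;> omega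

-- port of Source B's outer while loop over the remaining suffix
def altLoop : List Char → Int
  | [] => 0
  | c :: t =>
    if c = 'O' then
      (triangle ((spanO t).1 + 1) : Int) + altLoop (spanO t).2
    else altLoop t
termination_by l => l.length
decreasing_by
  · have := spanO_len t; simp; omega
  · simp

def successive_alt (string : String) : Int :=
  altLoop string.toList

-- ===== PRECONDITION & SPEC =====
def Spec_successive (string : String) (out : Int) : Prop := out = successive_alt string
instance (string : String) (out : Int) : Decidable (Spec_successive string out) := by unfold Spec_successive; infer_instance

-- ===== CLAIM (what is proved, stated in full; the proofs are below) =====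
def Claim_equal_successive : Prop := ∀ (string : String), Dom_successive string → Spec_successive string (successive string)

-- ===== LEMMAS AND PROOFS =====

theorem tri_succ (k : Nat) : triangle (k + 1) = triangle k + (k + 1) := by
  unfold triangle
  have h1 : (k + 1) * (k + 1 + 1) = k * (k + 1) + 2 * (k + 1) := by ring
  rw [h1]
  have h2 : k * (k + 1) % 2 = 0 := by
    rcases Nat.even_mul_succ_self k with ⟨m, hm⟩
    omega
  omega

theorem spanO_head (t : List Char) :
    (spanO t).2 = [] ∨ ∃ d t', (spanO t).2 = d :: t' ∧ d ≠ 'O' := by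
  induction t with
  | nil => left; simp [spanO]
  | cons c t ih =>
    by_cases h : c = 'O'
    · simpa [spanO, h] using ih
    · right; exact ⟨c, t, by simp [spanO, h], h⟩

theorem runLemma (t : List Char) (k : Nat) (res : Int) :
    successiveLoop (k : Int) (k : Int) res t =
      successiveLoop ((k + (spanO t).1 : Nat) : Int) ((k + (spanO t).1 : Nat) : Int)
        (res + (triangle (k + (spanO t).1) : Int) - (triangle k : Int)) (spanO t).2 := by
  induction t generalizing k res with
  | nil => simp [spanO, successiveLoop]
  | cons c t ih =>
    by_cases h : c = 'O'
    · have step : successiveLoop (k : Int) (k : Int) res (c :: t) =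
          successiveLoop ((k : Int) + 1) ((k : Int) + 1) (res + ((k : Int) + 1)) t := by
        simp [successiveLoop, h]
      rw [step]
      have cast1 : ((k : Int) + 1) = ((k + 1 : Nat) : Int) := by push_cast; ring
      rw [cast1, ih (k + 1) (res + ((k + 1 : Nat) : Int))]
      rw [show k + 1 + (spanO t).1 = k + ((spanO t).1 + 1) from by omega]
      have harith : res + ((k + 1 : Nat) : Int) + (triangle (k + ((spanO t).1 + 1)) : Int)
            - (triangle (k + 1) : Int)
          = res + (triangle (k + ((spanO t).1 + 1)) : Int) - (triangle k : Int) := by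
        have h3 : triangle (k + 1) = triangle k + (k + 1) := tri_succ k
        push_cast [h3]
        ring
      rw [harith]
      simp [spanO, h]
    · simp [spanO, h, successiveLoop]

theorem mainLemma (N : Nat) : ∀ (l : List Char), l.length ≤ N → ∀ res : Int,
    successiveLoop 0 0 res l = res + altLoop l := by
  induction N with
  | zero =>
    intro l hl res
    have : l = [] := by cases l <;> simp_all
    subst this; simp [successiveLoop, altLoop]
  | succ N ih =>
    intro l hl res
    cases l with
    | nil => simp [successiveLoop, altLoop]
    | cons c t =>
      by_cases h : c = 'O'
      · have step : successiveLoop 0 0 res (c :: t) =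
            successiveLoop 1 1 (res + 1) t := by
          simp [successiveLoop, h]
        rw [step]
        have h1 : ((1 : Nat) : Int) = (1 : Int) := by norm_num
        have hrun := runLemma t 1 (res + 1)
        rw [h1] at hrun
        rw [hrun]
        have htri1 : (triangle 1 : Int) = 1 := by norm_num [triangle]
        rcases spanO_head t with hr | ⟨d, t', hr, hd⟩
        · rw [hr]
          simp [successiveLoop, altLoop, h, hr, htri1]
          push_cast
          ring_nf
        · rw [hr]
          have step2 : ∀ a b X, successiveLoop a b X (d :: t') = successiveLoop 0 0 X t' := by
            intro a b X; simp [successiveLoop, hd]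
          rw [step2]
          have hlen : t'.length ≤ N := by
            have := spanO_len t
            rw [hr] at this
            simp at this hl
            omega
          rw [ih t' hlen]
          have haltr : altLoop (spanO t).2 = altLoop t' := by
            rw [hr]; simp [altLoop, hd]
          simp [altLoop, h, htri1, ← haltr]
          push_cast
          ring_nf
      · have step : successiveLoop 0 0 res (c :: t) = successiveLoop 0 0 res t := by
          simp [successiveLoop, h]
        rw [step, ih t (by simp at hl; omega)]
        simp [altLoop, h]

-- ===== VERDICT (by name: the statement is the Claim_ definition above) =====
theorem successive_spec : Claim_equal_successive := by
  intro s _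
  unfold Spec_successive successive successive_alt
  have := mainLemma s.toList.length s.toList le_rfl 0
  simpa using this
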